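-- pv_equiv track=rewrite | github.com/Charlie0410/skills | project-config/scripts/project_config.py | _find_unquoted_char
-- ===== SOURCE A (Python) =====
-- def _find_unquoted_char(line: str, target: str, start: int = 0) -> int | None:
--     quote: str | None = None
--     escaped = False
--     for index in range(start, len(line)):
--         char = line[index]
--         if quote == '"':
--             if escaped:
--                 escaped = False
--             elif char == "\\":
--                 escaped = True
--             elif char == '"':
--                 quote = None
--         elif quote == "'":
--             if char == "'":
--                 quote = None
--         else:
--             if char == target:
--                 return index
--             if char == '"':
--                 quote = '"'
--             elif char == "'":
--                 quote = "'"
--     return None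
-- ===== SOURCE B (Python) =====
-- def _find_unquoted_char(line: str, target: str, start: int = 0) -> int | None:
--     n = len(line)
--     i = start
--     while i < n:
--         char = line[i]
--         if char == target:
--             return i
--         if char == '"':
--             # skip a double-quoted region, honoring backslash escapes
--             i += 1
--             while i < n:
--                 c = line[i]
--                 if c == "\\":
--                     i += 2
--                 elif c == '"':
--                     break
--                 else:
--                     i += 1
--             i += 1
--         elif char == "'":
--             # skip a single-quoted region (no escapes)
--             i += 1
--             while i < n and line[i] != "'":
--                 i += 1
--             i += 1
--         else:
--             i += 1
--     return None
-- ===== Notes on version B (the rewrite author's own statement) =====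
-- stated objective: alternative
-- what changed: Replaced A's single-pass state machine that carries quote/escaped flags through every character with an outer scan that, on meeting a quote, delegates the whole quoted region to a dedicated inner skip loop (backslash-aware for double quotes, plain for single quotes), so no state flags remain.
import Mathlib
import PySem

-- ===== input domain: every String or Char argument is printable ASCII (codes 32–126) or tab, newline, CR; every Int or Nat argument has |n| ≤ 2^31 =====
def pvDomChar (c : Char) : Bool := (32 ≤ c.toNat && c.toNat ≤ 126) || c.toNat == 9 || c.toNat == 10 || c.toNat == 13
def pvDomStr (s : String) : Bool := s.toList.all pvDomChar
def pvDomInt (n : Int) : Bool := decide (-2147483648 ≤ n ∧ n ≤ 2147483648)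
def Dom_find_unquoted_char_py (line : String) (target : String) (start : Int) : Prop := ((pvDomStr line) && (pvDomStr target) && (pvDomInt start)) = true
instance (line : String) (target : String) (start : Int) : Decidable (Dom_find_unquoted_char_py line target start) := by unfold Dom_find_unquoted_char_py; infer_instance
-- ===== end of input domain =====

-- B replaces A's single-pass quote/escape state machine by an outer scan that delegates each
-- quoted region to a dedicated inner skip loop (alternative decomposition, same O(n) cost);
-- no side effects in either program.

-- ===== PORT A =====
-- A's for-loop over range(start, len(line)) carrying the (quote, escaped) state; early return = some.
-- fuel = number of remaining loop iterations (a totality guard only; (n - i).toNat at every call).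
def pvALoop (cs : List Char) (tgt : List Char) (n : Int) (quote : Option Char) (escaped : Bool) (i : Int) : Nat → Option Int
  | 0 => none
  | fuel + 1 =>
    if i < n then
      match PySem.List.pyGet? cs i with
      | none => none   -- Python raises IndexError here; excluded by Pre_
      | some c =>
        if quote = some '"' then
          if escaped then pvALoop cs tgt n quote false (i+1) fuel
          else if c = '\\' then pvALoop cs tgt n quote true (i+1) fuel
          else if c = '"' then pvALoop cs tgt n none escaped (i+1) fuel
          else pvALoop cs tgt n quote escaped (i+1) fuel
        else if quote = some '\'' then
          if c = '\'' then pvALoop cs tgt n none escaped (i+1) fuel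
          else pvALoop cs tgt n quote escaped (i+1) fuel
        else
          if [c] = tgt then some i
          else if c = '"' then pvALoop cs tgt n (some '"') escaped (i+1) fuel
          else if c = '\'' then pvALoop cs tgt n (some '\'') escaped (i+1) fuel
          else pvALoop cs tgt n quote escaped (i+1) fuel
    else none

def find_unquoted_char_py (line : String) (target : String) (start : Int) : Option Int :=
  pvALoop line.toList target.toList (line.toList.length : Int) none false start
    (((line.toList.length : Int) - start).toNat)

-- ===== PORT B =====
-- inner while loop skipping a double-quoted body (backslash skips the next char);
-- returns the index where the while-condition fails or where the closing quote sits
def pvSkipDq (cs : List Char) (n : Int) (i : Int) : Nat → Int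
  | 0 => i
  | fuel + 1 =>
    if i < n then
      match PySem.List.pyGet? cs i with
      | none => n      -- Python raises IndexError here; excluded by Pre_
      | some c =>
        if c = '\\' then pvSkipDq cs n (i+2) fuel
        else if c = '"' then i
        else pvSkipDq cs n (i+1) fuel
    else i

-- inner while loop skipping a single-quoted body (no escape handling)
def pvSkipSq (cs : List Char) (n : Int) (i : Int) : Nat → Int
  | 0 => i
  | fuel + 1 =>
    if i < n then
      match PySem.List.pyGet? cs i with
      | none => n      -- Python raises IndexError here; excluded by Pre_
      | some c => if c = '\'' then i else pvSkipSq cs n (i+1) fuel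
    else i

-- B's outer while loop; the remaining fuel also bounds each inner skip loop
def pvBLoop (cs : List Char) (tgt : List Char) (n : Int) (i : Int) : Nat → Option Int
  | 0 => none
  | fuel + 1 =>
    if i < n then
      match PySem.List.pyGet? cs i with
      | none => none   -- Python raises IndexError here; excluded by Pre_
      | some c =>
        if [c] = tgt then some i
        else if c = '"' then pvBLoop cs tgt n (pvSkipDq cs n (i+1) fuel + 1) fuel
        else if c = '\'' then pvBLoop cs tgt n (pvSkipSq cs n (i+1) fuel + 1) fuel
        else pvBLoop cs tgt n (i+1) fuel
    else none

def find_unquoted_char_py_alt (line : String) (target : String) (start : Int) : Option Int :=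
  pvBLoop line.toList target.toList (line.toList.length : Int) start
    (((line.toList.length : Int) - start).toNat)

-- ===== PRECONDITION & SPEC =====
-- Pre_ excludes exactly start < -len(line), where Python's line[index] raises IndexError in A
-- (and in B); it excludes no input on which A returns.
def Pre_find_unquoted_char_py (line : String) (target : String) (start : Int) : Prop :=
  -(line.toList.length : Int) ≤ start
instance (line : String) (target : String) (start : Int) : Decidable (Pre_find_unquoted_char_py line target start) := by unfold Pre_find_unquoted_char_py; infer_instance

def pvWitness_find_unquoted_char_py : String × String × Int := ("a'=x'b\"\\\"=\"=c", "=", 0)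

def Spec_find_unquoted_char_py (line : String) (target : String) (start : Int) (out : Option Int) : Prop := out = find_unquoted_char_py_alt line target start
instance (line : String) (target : String) (start : Int) (out : Option Int) : Decidable (Spec_find_unquoted_char_py line target start out) := by unfold Spec_find_unquoted_char_py; infer_instance

-- ===== CLAIM (what is proved, stated in full; the proofs are below) =====
def Claim_equal_find_unquoted_char_py : Prop := ∀ (line : String) (target : String) (start : Int), Dom_find_unquoted_char_py line target start → Pre_find_unquoted_char_py line target start → Spec_find_unquoted_char_py line target start (find_unquoted_char_py line target start)

-- ===== LEMMAS AND PROOFS =====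

theorem pvGetSome (cs : List Char) (i : Int) (h0 : -(cs.length : Int) ≤ i) (h1 : i < (cs.length : Int)) :
    ∃ c, PySem.List.pyGet? cs i = some c := by
  cases h : PySem.List.pyGet? cs i with
  | some c => exact ⟨c, rfl⟩
  | none =>
    rw [PySem.List.pyGet?_eq_none_iff] at h
    exact absurd ⟨h0, h1⟩ h

theorem pvALoop_none (cs tgt : List Char) (n : Int) (q : Option Char) (e : Bool) (i : Int)
    (h : ¬ i < n) : ∀ f, pvALoop cs tgt n q e i f = none := by
  intro f; cases f <;> simp [pvALoop, h]

theorem pvBLoop_none (cs tgt : List Char) (n : Int) (i : Int)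
    (h : ¬ i < n) : ∀ f, pvBLoop cs tgt n i f = none := by
  intro f; cases f <;> simp [pvBLoop, h]

theorem pvSkipDq_stop (cs : List Char) (n : Int) (i : Int)
    (h : ¬ i < n) : ∀ f, pvSkipDq cs n i f = i := by
  intro f; cases f <;> simp [pvSkipDq, h]

theorem pvSkipSq_stop (cs : List Char) (n : Int) (i : Int)
    (h : ¬ i < n) : ∀ f, pvSkipSq cs n i f = i := by
  intro f; cases f <;> simp [pvSkipSq, h]

-- the three loop states of A, each matched with the corresponding position of B;
-- fuels are arbitrary as long as they cover the remaining (n - i) iterations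
theorem pvMain (cs tgt : List Char) : ∀ (k : Nat) (i : Int), -(cs.length : Int) ≤ i → ((cs.length : Int) - i).toNat ≤ k →
    (∀ fa fb, ((cs.length : Int) - i).toNat ≤ fa → ((cs.length : Int) - i).toNat ≤ fb →
      pvALoop cs tgt (cs.length : Int) none false i fa = pvBLoop cs tgt (cs.length : Int) i fb) ∧
    (∀ fa fb fd, ((cs.length : Int) - i).toNat ≤ fa → ((cs.length : Int) - i).toNat ≤ fb → ((cs.length : Int) - i).toNat ≤ fd →
      pvALoop cs tgt (cs.length : Int) (some '"') false i fa = pvBLoop cs tgt (cs.length : Int) (pvSkipDq cs (cs.length : Int) i fd + 1) fb) ∧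
    (∀ fa fb fs, ((cs.length : Int) - i).toNat ≤ fa → ((cs.length : Int) - i).toNat ≤ fb → ((cs.length : Int) - i).toNat ≤ fs →
      pvALoop cs tgt (cs.length : Int) (some '\'') false i fa = pvBLoop cs tgt (cs.length : Int) (pvSkipSq cs (cs.length : Int) i fs + 1) fb) := by
  intro k
  induction k with
  | zero =>
    intro i h0 hk
    have hn : ¬ (i < (cs.length : Int)) := by omega
    refine ⟨?_, ?_, ?_⟩
    · intro fa fb _ _
      rw [pvALoop_none _ _ _ _ _ _ hn, pvBLoop_none _ _ _ _ hn]
    · intro fa fb fd _ _ _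
      rw [pvALoop_none _ _ _ _ _ _ hn, pvSkipDq_stop _ _ _ hn, pvBLoop_none _ _ _ _ (by omega)]
    · intro fa fb fs _ _ _
      rw [pvALoop_none _ _ _ _ _ _ hn, pvSkipSq_stop _ _ _ hn, pvBLoop_none _ _ _ _ (by omega)]
  | succ k ih =>
    intro i h0 hk
    by_cases hin : i < (cs.length : Int)
    · obtain ⟨c, hc⟩ := pvGetSome cs i h0 hin
      have h1 : -(cs.length : Int) ≤ i + 1 := by omega
      have hk1 : ((cs.length : Int) - (i + 1)).toNat ≤ k := by omega
      refine ⟨?_, ?_, ?_⟩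
      · -- unquoted state vs outer loop
        intro fa fb hfa hfb
        obtain ⟨fa, rfl⟩ : ∃ f, fa = f + 1 := ⟨fa - 1, by omega⟩
        obtain ⟨fb, rfl⟩ : ∃ f, fb = f + 1 := ⟨fb - 1, by omega⟩
        have hfa1 : ((cs.length : Int) - (i + 1)).toNat ≤ fa := by omega
        have hfb1 : ((cs.length : Int) - (i + 1)).toNat ≤ fb := by omega
        rw [pvALoop, pvBLoop]
        simp only [if_pos hin, hc]
        by_cases ht : [c] = tgt
        · simp [ht]
        · by_cases hdq : c = '"'
          · subst hdq
            simpa [ht] using (ih (i + 1) h1 hk1).2.1 fa fb fb hfa1 hfb1 hfb1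
          · by_cases hsq : c = '\''
            · subst hsq
              simpa [ht] using (ih (i + 1) h1 hk1).2.2 fa fb fb hfa1 hfb1 hfb1
            · simpa [ht, hdq, hsq] using (ih (i + 1) h1 hk1).1 fa fb hfa1 hfb1
      · -- double-quote state vs double-quote skip loop
        intro fa fb fd hfa hfb hfd
        obtain ⟨fa, rfl⟩ : ∃ f, fa = f + 1 := ⟨fa - 1, by omega⟩
        obtain ⟨fd, rfl⟩ : ∃ f, fd = f + 1 := ⟨fd - 1, by omega⟩
        have hfa1 : ((cs.length : Int) - (i + 1)).toNat ≤ fa := by omega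
        have hfd1 : ((cs.length : Int) - (i + 1)).toNat ≤ fd := by omega
        have hfb1 : ((cs.length : Int) - (i + 1)).toNat ≤ fb := by omega
        rw [pvALoop, pvSkipDq]
        simp only [if_pos hin, hc]
        by_cases hbs : c = '\\'
        · subst hbs
          simp only [reduceIte, Bool.false_eq_true]
          by_cases h2 : i + 1 < (cs.length : Int)
          · obtain ⟨c2, hc2⟩ := pvGetSome cs (i + 1) h1 h2
            obtain ⟨fa, rfl⟩ : ∃ f, fa = f + 1 := ⟨fa - 1, by omega⟩
            rw [pvALoop]
            simp only [if_pos h2, hc2]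
            have h3 : -(cs.length : Int) ≤ i + 2 := by omega
            have hk2 : ((cs.length : Int) - (i + 2)).toNat ≤ k := by omega
            have hfa2 : ((cs.length : Int) - (i + 2)).toNat ≤ fa := by omega
            have hfd2 : ((cs.length : Int) - (i + 2)).toNat ≤ fd := by omega
            have hfb2 : ((cs.length : Int) - (i + 2)).toNat ≤ fb := by omega
            rw [show i + 1 + 1 = i + 2 from by ring]
            simpa using (ih (i + 2) h3 hk2).2.1 fa fb fd hfa2 hfb2 hfd2
          · rw [pvALoop_none _ _ _ _ _ _ h2, pvSkipDq_stop _ _ _ (by omega),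
               pvBLoop_none _ _ _ _ (by omega)]
        · by_cases hdq : c = '"'
          · subst hdq
            simpa [hbs] using (ih (i + 1) h1 hk1).1 fa fb hfa1 hfb1
          · simpa [hbs, hdq] using (ih (i + 1) h1 hk1).2.1 fa fb fd hfa1 hfb1 hfd1
      · -- single-quote state vs single-quote skip loop
        intro fa fb fs hfa hfb hfs
        obtain ⟨fa, rfl⟩ : ∃ f, fa = f + 1 := ⟨fa - 1, by omega⟩
        obtain ⟨fs, rfl⟩ : ∃ f, fs = f + 1 := ⟨fs - 1, by omega⟩
        have hfa1 : ((cs.length : Int) - (i + 1)).toNat ≤ fa := by omega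
        have hfs1 : ((cs.length : Int) - (i + 1)).toNat ≤ fs := by omega
        have hfb1 : ((cs.length : Int) - (i + 1)).toNat ≤ fb := by omega
        rw [pvALoop, pvSkipSq]
        simp only [if_pos hin, hc]
        by_cases hsq : c = '\''
        · subst hsq
          simpa using (ih (i + 1) h1 hk1).1 fa fb hfa1 hfb1
        · simpa [hsq] using (ih (i + 1) h1 hk1).2.2 fa fb fs hfa1 hfb1 hfs1
    · have hn := hin
      refine ⟨?_, ?_, ?_⟩
      · intro fa fb _ _
        rw [pvALoop_none _ _ _ _ _ _ hn, pvBLoop_none _ _ _ _ hn]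
      · intro fa fb fd _ _ _
        rw [pvALoop_none _ _ _ _ _ _ hn, pvSkipDq_stop _ _ _ hn, pvBLoop_none _ _ _ _ (by omega)]
      · intro fa fb fs _ _ _
        rw [pvALoop_none _ _ _ _ _ _ hn, pvSkipSq_stop _ _ _ hn, pvBLoop_none _ _ _ _ (by omega)]

-- ===== VERDICT (by name: the statement is the Claim_ definition above) =====
theorem find_unquoted_char_py_spec : Claim_equal_find_unquoted_char_py := by
  intro line target start _ hpre
  have h := (pvMain line.toList target.toList (((line.toList.length : Int) - start).toNat) start hpre le_rfl).1
    (((line.toList.length : Int) - start).toNat) (((line.toList.length : Int) - start).toNat) le_rfl le_rfl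
  simpa [Spec_find_unquoted_char_py, find_unquoted_char_py, find_unquoted_char_py_alt] using h
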